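-- pv_equiv track=rewrite | github.com/rconnor86/-TweetYourHeartOut | Neural Network/analytics.py | getPosNegCounts
-- ===== SOURCE A (Python) =====
-- def getPosNegCounts(preds):
--     counts = []
--     for i in range(0, 3):
--         counts.append(0)
--
--     for pred in preds:
--         if pred == 0 or pred == 2 or pred == 3:
--             counts[0] += 1
--         if pred == 1 or pred == 6 or pred == 7 or pred == 8 or pred == 9 or pred == 11:
--             counts[1] += 1
--         if pred == 4 or pred == 5 or pred == 10 or pred == 12:
--             counts[2] += 1
--     return counts
-- ===== SOURCE B (Python) =====
-- def getPosNegCounts(preds):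
--     return [sum(preds.count(v) for v in vals)
--             for vals in ((0, 2, 3), (1, 6, 7, 8, 9, 11), (4, 5, 10, 12))]
-- ===== Notes on version B (the rewrite author's own statement) =====
-- stated objective: alternative
-- what changed: Replaced the single stateful pass with three if-branches incrementing a mutable counts list by a stateless, count-based formulation: each bucket's total is computed directly as the sum of preds.count(v) over that bucket's values, built as a comprehension over the three value tuples.
import Mathlib
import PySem

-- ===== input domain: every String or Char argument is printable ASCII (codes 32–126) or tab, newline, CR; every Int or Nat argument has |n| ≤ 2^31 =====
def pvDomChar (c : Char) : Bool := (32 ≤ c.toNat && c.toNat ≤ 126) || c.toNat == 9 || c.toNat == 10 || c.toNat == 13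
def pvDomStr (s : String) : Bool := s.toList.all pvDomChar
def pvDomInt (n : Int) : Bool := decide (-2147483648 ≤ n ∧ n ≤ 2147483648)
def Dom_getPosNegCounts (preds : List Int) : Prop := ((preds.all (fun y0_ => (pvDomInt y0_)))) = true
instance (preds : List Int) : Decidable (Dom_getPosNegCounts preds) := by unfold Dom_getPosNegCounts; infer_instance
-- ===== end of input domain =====

-- B replaces A's stateful single pass (mutable counts, three if-branches) by a stateless
-- count-based formulation: each bucket total is the sum of preds.count(v) over the bucket's values (alternative).

-- ===== PORT A =====
-- counts[i] += 1 on an in-range index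
def pvIncAt (cs : List Int) (i : Nat) : List Int := cs.set i (cs.getD i 0 + 1)

def getPosNegCountsStep (counts : List Int) (pred : Int) : List Int :=
  let counts := if pred = 0 ∨ pred = 2 ∨ pred = 3 then pvIncAt counts 0 else counts
  let counts := if pred = 1 ∨ pred = 6 ∨ pred = 7 ∨ pred = 8 ∨ pred = 9 ∨ pred = 11 then pvIncAt counts 1 else counts
  let counts := if pred = 4 ∨ pred = 5 ∨ pred = 10 ∨ pred = 12 then pvIncAt counts 2 else counts
  counts

def getPosNegCounts (preds : List Int) : List Int :=
  let counts := (PySem.List.pyRange 0 3 1).foldl (fun cs _ => cs ++ [0]) []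
  preds.foldl getPosNegCountsStep counts

-- ===== PORT B =====
-- the three bucket value tuples of Source B
def pvBuckets : List (List Int) := [[0, 2, 3], [1, 6, 7, 8, 9, 11], [4, 5, 10, 12]]

-- sum(preds.count(v) for v in vals)
def pvBucketSum (preds : List Int) (vals : List Int) : Int :=
  vals.foldl (fun s v => s + (PySem.List.count preds v : Int)) 0

def getPosNegCounts_alt (preds : List Int) : List Int :=
  pvBuckets.map (fun vals => pvBucketSum preds vals)

-- ===== PRECONDITION & SPEC =====
def Spec_getPosNegCounts (preds : List Int) (out : List Int) : Prop := out = getPosNegCounts_alt preds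
instance (preds : List Int) (out : List Int) : Decidable (Spec_getPosNegCounts preds out) := by unfold Spec_getPosNegCounts; infer_instance

-- ===== CLAIM (what is proved, stated in full; the proofs are below) =====
def Claim_equal_getPosNegCounts : Prop := ∀ (preds : List Int), Dom_getPosNegCounts preds → Spec_getPosNegCounts preds (getPosNegCounts preds)

-- ===== LEMMAS AND PROOFS =====
theorem foldl_step_counts (preds : List Int) : ∀ (a b c : Int),
    preds.foldl getPosNegCountsStep [a, b, c] =
      [a + ((preds.count 0 + preds.count 2 + preds.count 3 : Nat) : Int),
       b + ((preds.count 1 + preds.count 6 + preds.count 7 + preds.count 8 + preds.count 9 + preds.count 11 : Nat) : Int),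
       c + ((preds.count 4 + preds.count 5 + preds.count 10 + preds.count 12 : Nat) : Int)] := by
  induction preds with
  | nil => intro a b c; simp
  | cons p ps ih =>
    intro a b c
    by_cases h0 : p = 0
    · subst h0; simp [getPosNegCountsStep, pvIncAt, ih]; ring
    by_cases h2 : p = 2
    · subst h2; simp [getPosNegCountsStep, pvIncAt, ih]; ring
    by_cases h3 : p = 3
    · subst h3; simp [getPosNegCountsStep, pvIncAt, ih]; ring
    by_cases h1 : p = 1
    · subst h1; simp [getPosNegCountsStep, pvIncAt, ih]; ring
    by_cases h6 : p = 6
    · subst h6; simp [getPosNegCountsStep, pvIncAt, ih]; ring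
    by_cases h7 : p = 7
    · subst h7; simp [getPosNegCountsStep, pvIncAt, ih]; ring
    by_cases h8 : p = 8
    · subst h8; simp [getPosNegCountsStep, pvIncAt, ih]; ring
    by_cases h9 : p = 9
    · subst h9; simp [getPosNegCountsStep, pvIncAt, ih]; ring
    by_cases h11 : p = 11
    · subst h11; simp [getPosNegCountsStep, pvIncAt, ih]; ring
    by_cases h4 : p = 4
    · subst h4; simp [getPosNegCountsStep, pvIncAt, ih]; ring
    by_cases h5 : p = 5
    · subst h5; simp [getPosNegCountsStep, pvIncAt, ih]; ring
    by_cases h10 : p = 10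
    · subst h10; simp [getPosNegCountsStep, pvIncAt, ih]; ring
    by_cases h12 : p = 12
    · subst h12; simp [getPosNegCountsStep, pvIncAt, ih]; ring
    · simp [getPosNegCountsStep, h0, h1, h2, h3, h4, h5, h6, h7, h8, h9, h10, h11, h12, ih]

-- ===== VERDICT (by name: the statement is the Claim_ definition above) =====
theorem getPosNegCounts_spec : Claim_equal_getPosNegCounts := by
  intro preds _
  show getPosNegCounts preds = getPosNegCounts_alt preds
  have hinit : (PySem.List.pyRange 0 3 1).foldl (fun cs _ => cs ++ [0]) ([] : List Int) = [0, 0, 0] := by decide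
  simp only [getPosNegCounts, hinit, foldl_step_counts]
  simp [getPosNegCounts_alt, pvBuckets, pvBucketSum, PySem.List.count_eq]
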